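-- pv_equiv track=rewrite | github.com/alicenoknow/ASD | Graphs/SCC.py | DFS_time
-- ===== SOURCE A (Python) =====
-- def DFS_time_visit(G, s, u, time, T):
--     T += 1
--     for n in G[u]:
--         if time[n][1] is None and n != s:
--            time[n][1] = T
--            T = DFS_time_visit(G, s, n, time, T)
--     return T
--
-- def DFS_time( G ):
--     v = len(G)
--     time = [[i, None] for i in range(v)]
--     T = 0
--     for u in range(v):
--         if time[u][1] is None:
--             time[u][1] = T
--             T = DFS_time_visit(G, u, u, time, T)
--     return time
-- ===== SOURCE B (Python) =====
-- def DFS_time(G):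
--     v = len(G)
--     time = [[i, None] for i in range(v)]
--     c = 0
--     for u in range(v):
--         if time[u][1] is not None:
--             continue
--         time[u][1] = c
--         c += 1
--         stack = [(u, 0)]
--         while stack:
--             x, i = stack[-1]
--             if i < len(G[x]):
--                 stack[-1] = (x, i + 1)
--                 n = G[x][i]
--                 if time[n][1] is None:
--                     time[n][1] = c
--                     c += 1
--                     stack.append((n, 0))
--             else:
--                 stack.pop()
--     return time
-- ===== Notes on version B (the rewrite author's own statement) =====
-- stated objective: alternative
-- what changed: Replaced the recursive DFS helper (DFS_time_visit) by an iterative DFS using an explicit stack of (node, next-neighbour-index) pairs with a single discovery counter, producing the same preorder discovery times without recursion.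
import Mathlib
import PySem

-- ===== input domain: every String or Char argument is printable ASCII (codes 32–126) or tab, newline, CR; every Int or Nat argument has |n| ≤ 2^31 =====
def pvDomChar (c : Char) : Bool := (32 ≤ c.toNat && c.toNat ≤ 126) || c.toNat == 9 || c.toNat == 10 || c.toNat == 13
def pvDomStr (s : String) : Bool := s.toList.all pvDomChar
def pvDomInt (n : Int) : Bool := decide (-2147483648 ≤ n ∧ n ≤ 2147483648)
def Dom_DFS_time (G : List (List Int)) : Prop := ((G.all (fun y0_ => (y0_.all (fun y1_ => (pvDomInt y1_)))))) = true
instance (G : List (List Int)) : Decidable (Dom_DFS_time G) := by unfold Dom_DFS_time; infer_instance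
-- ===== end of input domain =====

-- B replaces A's recursive DFS_time_visit by an iterative DFS with an explicit (node, neighbor-index)
-- stack and a single discovery counter; same preorder discovery times, no recursion (objective: alternative).

-- ===== PORT A =====
-- A's DFS_time_visit does 'T += 1' then loops over G[u]; we port the loop over the remaining
-- neighbour list 'ns' (called with T already incremented).  'fuel' only bounds the recursion
-- depth to make the definition total (A's recursion terminates because each nested call first
-- marks a None entry); it is set to len(G) at the top, which the proofs show is never exhausted.
-- Where Python would raise IndexError (neighbour index out of range, excluded by Pre_), the
-- port skips that neighbour.
def DFS_visitLoop (G : List (List Int)) : Nat → Int → List Int → List (Option Int) → Int → (List (Option Int) × Int)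
  | _, _, [], time, T => (time, T)
  | fuel, s, n :: ns, time, T =>
    match PySem.List.pyGet? time n with
    | none => DFS_visitLoop G fuel s ns time T
    | some tv =>
      if tv = none ∧ n ≠ s then
        let time1 := PySem.List.pySetD time n (some T)
        match fuel with
        | 0 => DFS_visitLoop G 0 s ns time1 T
        | fuel' + 1 =>
          let r := DFS_visitLoop G fuel' s ((PySem.List.pyGet? G n).getD []) time1 (T + 1)
          DFS_visitLoop G (fuel' + 1) s ns r.1 r.2
      else DFS_visitLoop G fuel s ns time T
termination_by fuel _ ns _ _ => (fuel, ns.length)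
decreasing_by all_goals simp_wf <;> omega

-- time = [[i, None] …] is represented as a List (Option Int) of the mutable second components;
-- the constant first components [i, ·] are reattached when the result is built.
def DFS_time (G : List (List Int)) : List (List Int) :=
  let v := G.length
  let fin := (List.range v).foldl (fun (st : List (Option Int) × Int) u =>
      if st.1.getD u none = none then
        DFS_visitLoop G v (u : Int) ((PySem.List.pyGet? G (u : Int)).getD []) (st.1.set u (some st.2)) (st.2 + 1)
      else st) (List.replicate v none, 0)
  List.zipWith (fun (i : Nat) o => [(i : Int), o.getD 0]) (List.range v) fin.1

-- ===== PORT B =====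
def DFS_frameW (G : List (List Int)) (p : Int × Nat) : Nat :=
  ((PySem.List.pyGet? G p.1).getD []).length + 1 - min p.2 ((PySem.List.pyGet? G p.1).getD []).length

-- Source B's while-loop over the explicit stack of (node, next neighbour index) pairs; 'fuel' is a
-- totality guard consumed only at discoveries (the loop terminates because each iteration pops,
-- advances an index, or discovers an unvisited vertex); it is len(G) at the top and the proofs
-- show it is never exhausted.  Out-of-range neighbours (Python IndexError, excluded by Pre_)
-- are skipped.
def DFS_machine (G : List (List Int)) : Nat → List (Int × Nat) → List (Option Int) → Int → (List (Option Int) × Int)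
  | _, [], time, c => (time, c)
  | fuel, (x, i) :: st, time, c =>
    if h : i < ((PySem.List.pyGet? G x).getD []).length then
      let n := ((PySem.List.pyGet? G x).getD [])[i]
      match PySem.List.pyGet? time n with
      | none => DFS_machine G fuel ((x, i + 1) :: st) time c
      | some tv =>
        if tv = none then
          match fuel with
          | 0 => DFS_machine G 0 ((x, i + 1) :: st) time c
          | fuel' + 1 =>
            DFS_machine G fuel' ((n, 0) :: (x, i + 1) :: st) (PySem.List.pySetD time n (some c)) (c + 1)
        else DFS_machine G fuel ((x, i + 1) :: st) time c
    else DFS_machine G fuel st time c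
termination_by fuel st _ _ => (fuel, (st.map (DFS_frameW G)).sum)
decreasing_by all_goals simp [Prod.lex_iff, DFS_frameW] <;> omega

def DFS_time_alt (G : List (List Int)) : List (List Int) :=
  let v := G.length
  let fin := (List.range v).foldl (fun (st : List (Option Int) × Int) u =>
      if st.1.getD u none ≠ none then st
      else DFS_machine G v [((u : Int), 0)] (st.1.set u (some st.2)) (st.2 + 1)) (List.replicate v none, 0)
  List.zipWith (fun (i : Nat) o => [(i : Int), o.getD 0]) (List.range v) fin.1

-- ===== PRECONDITION & SPEC =====
-- Pre_ excludes exactly the graphs with a neighbour entry outside [-len(G), len(G)), on which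
-- Python A raises IndexError at 'time[n][1]'.
def Pre_DFS_time (G : List (List Int)) : Prop :=
  ∀ row ∈ G, ∀ n ∈ row, -(G.length : Int) ≤ n ∧ n < (G.length : Int)
instance (G : List (List Int)) : Decidable (Pre_DFS_time G) := by unfold Pre_DFS_time; infer_instance

def pvWitness_DFS_time : List (List Int) := [[1], [0, 0]]

def Spec_DFS_time (G : List (List Int)) (out : List (List Int)) : Prop := out = DFS_time_alt G
instance (G : List (List Int)) (out : List (List Int)) : Decidable (Spec_DFS_time G out) := by unfold Spec_DFS_time; infer_instance

-- ===== CLAIM (what is proved, stated in full; the proofs are below) =====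
def Claim_equal_DFS_time : Prop := ∀ (G : List (List Int)), Dom_DFS_time G → Pre_DFS_time G → Spec_DFS_time G (DFS_time G)

-- ===== LEMMAS AND PROOFS =====

def ncount (t : List (Option Int)) : Nat := t.countP (fun o => o.isNone)

def Mono (t t' : List (Option Int)) : Prop := List.Forall₂ (fun a b => a.isSome → b.isSome) t t'

def SomeAt (t : List (Option Int)) (s : Int) : Prop := ∃ x, PySem.List.pyGet? t s = some (some x)

theorem pyGet?_some {α : Type} {t : List α} {i : Int} {x : α}
    (h : PySem.List.pyGet? t i = some x) :
    ∃ k, PySem.List.pyIdx? t.length i = some k ∧ t[k]? = some x := by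
  unfold PySem.List.pyGet? at h
  cases hk : PySem.List.pyIdx? t.length i <;> simp [hk] at h ⊢
  · exact h

theorem pyGet?_eq_of_idx {α : Type} {t : List α} {i : Int} {k : Nat}
    (hk : PySem.List.pyIdx? t.length i = some k) :
    PySem.List.pyGet? t i = t[k]? := by
  unfold PySem.List.pyGet?; simp [hk]

theorem pySetD_eq_set {α : Type} (t : List α) (i : Int) (v : α) {k : Nat}
    (hk : PySem.List.pyIdx? t.length i = some k) :
    PySem.List.pySetD t i v = t.set k v := by
  unfold PySem.List.pySetD PySem.List.pySet?; simp [hk]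

theorem ncount_pos {t : List (Option Int)} {k : Nat} (hk : t[k]? = some none) :
    0 < ncount t := by
  unfold ncount
  exact List.countP_pos_iff.2 ⟨none, List.mem_of_getElem? hk, by simp⟩

theorem ncount_set_of_none {t : List (Option Int)} {k : Nat} {v : Int}
    (hk : t[k]? = some none) : ncount t = ncount (t.set k (some v)) + 1 := by
  induction t generalizing k with
  | nil => simp at hk
  | cons a t ih =>
    cases k with
    | zero =>
      simp at hk
      subst hk
      simp [ncount, List.countP_cons]
    | succ k =>
      simp at hk
      simp [ncount, List.countP_cons] at *
      have := ih hk
      omega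

theorem ncount_le_length (t : List (Option Int)) : ncount t ≤ t.length := by
  unfold ncount; exact List.countP_le_length

theorem mono_refl (t : List (Option Int)) : Mono t t := by
  unfold Mono
  exact List.forall₂_same.2 (fun a _ h => h)

theorem mono_trans {t1 t2 t3 : List (Option Int)} (h1 : Mono t1 t2) (h2 : Mono t2 t3) : Mono t1 t3 := by
  unfold Mono at *
  induction h1 generalizing t3 with
  | nil => cases h2; exact List.Forall₂.nil
  | cons h hs ih =>
    cases h2 with
    | cons h' hs' => exact List.Forall₂.cons (fun ha => h' (h ha)) (ih hs')

theorem mono_set_of_none {t : List (Option Int)} {k : Nat} {v : Int}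
    (hk : t[k]? = some none) : Mono t (t.set k (some v)) := by
  induction t generalizing k with
  | nil => simp at hk
  | cons a t ih =>
    cases k with
    | zero =>
      simp at hk
      subst hk
      exact List.Forall₂.cons (by simp) (mono_refl t)
    | succ k =>
      simp at hk
      exact List.Forall₂.cons (fun h => h) (ih hk)

theorem mono_length {t t' : List (Option Int)} (h : Mono t t') : t.length = t'.length :=
  List.Forall₂.length_eq h

theorem ncount_le_of_mono {t t' : List (Option Int)} (h : Mono t t') : ncount t' ≤ ncount t := by
  unfold Mono at h
  induction h with
  | nil => simp
  | cons hab hs ih =>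
    rename_i a b l1 l2
    simp [ncount, List.countP_cons] at *
    cases ha : a.isNone <;> cases hb : b.isNone <;>
      simp_all [Option.isNone_iff_eq_none, Option.isSome_iff_ne_none] <;> omega

theorem mono_get {t t' : List (Option Int)} (h : Mono t t') {k : Nat} {x : Int}
    (hk : t[k]? = some (some x)) : ∃ y, t'[k]? = some (some y) := by
  unfold Mono at h
  induction h generalizing k with
  | nil => simp at hk
  | cons hab hs ih =>
    rename_i a b l1 l2
    cases k with
    | zero =>
      simp at hk
      subst hk
      have : b.isSome := hab (by simp)
      obtain ⟨y, hy⟩ := Option.isSome_iff_exists.1 this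
      exact ⟨y, by simp [hy]⟩
    | succ k =>
      simp at hk ⊢
      exact ih hk

theorem someAt_mono {t t' : List (Option Int)} {s : Int} (h : Mono t t') (hs : SomeAt t s) :
    SomeAt t' s := by
  obtain ⟨x, hx⟩ := hs
  obtain ⟨k, hk, hg⟩ := pyGet?_some hx
  obtain ⟨y, hy⟩ := mono_get h hg
  exact ⟨y, by rw [pyGet?_eq_of_idx (by rw [← mono_length h]; exact hk)]; exact hy⟩

theorem mono_pySetD_of_none {t : List (Option Int)} {n : Int} {v : Int}
    (hn : PySem.List.pyGet? t n = some none) :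
    Mono t (PySem.List.pySetD t n (some v)) := by
  obtain ⟨k, hk, hg⟩ := pyGet?_some hn
  rw [pySetD_eq_set t n (some v) hk]
  exact mono_set_of_none hg

theorem ncount_pySetD_of_none {t : List (Option Int)} {n : Int} {v : Int}
    (hn : PySem.List.pyGet? t n = some none) :
    ncount t = ncount (PySem.List.pySetD t n (some v)) + 1 := by
  obtain ⟨k, hk, hg⟩ := pyGet?_some hn
  rw [pySetD_eq_set t n (some v) hk]
  exact ncount_set_of_none hg

theorem ncount_pos_of_get {t : List (Option Int)} {n : Int}
    (hn : PySem.List.pyGet? t n = some none) : 0 < ncount t := by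
  obtain ⟨k, hk, hg⟩ := pyGet?_some hn
  exact ncount_pos hg

theorem mono_visitLoop (G : List (List Int)) (fuel : Nat) (s : Int) (ns : List Int)
    (t : List (Option Int)) (T : Int) : Mono t (DFS_visitLoop G fuel s ns t T).1 := by
  fun_induction DFS_visitLoop G fuel s ns t T with
  | case1 _ _ time T => exact mono_refl _
  | case2 fuel s n ns time T hn ih => exact ih
  | case3 s n ns time T tv hn hc time1 ih =>
    exact mono_trans (mono_pySetD_of_none (hc.1 ▸ hn)) ih
  | case4 s n ns time T tv hn hc time1 fuel' r ih1 ih1' ih2 =>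
    exact mono_trans (mono_pySetD_of_none (hc.1 ▸ hn)) (mono_trans ih1 ih2)
  | case5 fuel s n ns time T tv hn hc ih => exact ih

theorem vL_nil (G : List (List Int)) (fuel : Nat) (s : Int) (t : List (Option Int)) (T : Int) :
    DFS_visitLoop G fuel s [] t T = (t, T) := by
  rw [DFS_visitLoop.eq_def]

theorem vL_cons_none (G : List (List Int)) (fuel : Nat) (s n : Int) (ns : List Int)
    (t : List (Option Int)) (T : Int) (hn : PySem.List.pyGet? t n = none) :
    DFS_visitLoop G fuel s (n :: ns) t T = DFS_visitLoop G fuel s ns t T := by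
  conv_lhs => rw [DFS_visitLoop.eq_def]
  simp only [hn]

theorem vL_cons_skip (G : List (List Int)) (fuel : Nat) (s n : Int) (ns : List Int)
    (t : List (Option Int)) (T : Int) (tv : Option Int)
    (hn : PySem.List.pyGet? t n = some tv) (hc : ¬(tv = none ∧ n ≠ s)) :
    DFS_visitLoop G fuel s (n :: ns) t T = DFS_visitLoop G fuel s ns t T := by
  conv_lhs => rw [DFS_visitLoop.eq_def]
  simp only [hn, if_neg hc]

theorem vL_cons_disc (G : List (List Int)) (fuel' : Nat) (s n : Int) (ns : List Int)
    (t : List (Option Int)) (T : Int) (tv : Option Int)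
    (hn : PySem.List.pyGet? t n = some tv) (hc : tv = none ∧ n ≠ s) :
    DFS_visitLoop G (fuel' + 1) s (n :: ns) t T =
      DFS_visitLoop G (fuel' + 1) s ns
        (DFS_visitLoop G fuel' s ((PySem.List.pyGet? G n).getD [])
          (PySem.List.pySetD t n (some T)) (T + 1)).1
        (DFS_visitLoop G fuel' s ((PySem.List.pyGet? G n).getD [])
          (PySem.List.pySetD t n (some T)) (T + 1)).2 := by
  conv_lhs => rw [DFS_visitLoop.eq_def]
  simp only [hn, if_pos hc]

theorem m_nil (G : List (List Int)) (fuel : Nat) (t : List (Option Int)) (c : Int) :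
    DFS_machine G fuel [] t c = (t, c) := by
  rw [DFS_machine.eq_def]

theorem m_pop (G : List (List Int)) (fuel : Nat) (x : Int) (i : Nat) (st : List (Int × Nat))
    (t : List (Option Int)) (c : Int) (hi : ¬ i < ((PySem.List.pyGet? G x).getD []).length) :
    DFS_machine G fuel ((x, i) :: st) t c = DFS_machine G fuel st t c := by
  conv_lhs => rw [DFS_machine.eq_def]
  simp only [dif_neg hi]

theorem m_skip_none (G : List (List Int)) (fuel : Nat) (x : Int) (i : Nat) (st : List (Int × Nat))
    (t : List (Option Int)) (c : Int) (hi : i < ((PySem.List.pyGet? G x).getD []).length)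
    (hn : PySem.List.pyGet? t ((PySem.List.pyGet? G x).getD [])[i] = none) :
    DFS_machine G fuel ((x, i) :: st) t c = DFS_machine G fuel ((x, i + 1) :: st) t c := by
  conv_lhs => rw [DFS_machine.eq_def]
  simp only [dif_pos hi, hn]

theorem m_skip_vis (G : List (List Int)) (fuel : Nat) (x : Int) (i : Nat) (st : List (Int × Nat))
    (t : List (Option Int)) (c : Int) (tv : Option Int)
    (hi : i < ((PySem.List.pyGet? G x).getD []).length)
    (hn : PySem.List.pyGet? t ((PySem.List.pyGet? G x).getD [])[i] = some tv) (htv : ¬ tv = none) :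
    DFS_machine G fuel ((x, i) :: st) t c = DFS_machine G fuel ((x, i + 1) :: st) t c := by
  conv_lhs => rw [DFS_machine.eq_def]
  simp only [dif_pos hi, hn, if_neg htv]

theorem m_disc (G : List (List Int)) (fuel' : Nat) (x : Int) (i : Nat) (st : List (Int × Nat))
    (t : List (Option Int)) (c : Int) (hi : i < ((PySem.List.pyGet? G x).getD []).length)
    (hn : PySem.List.pyGet? t ((PySem.List.pyGet? G x).getD [])[i] = some none) :
    DFS_machine G (fuel' + 1) ((x, i) :: st) t c =
      DFS_machine G fuel' ((((PySem.List.pyGet? G x).getD [])[i], 0) :: (x, i + 1) :: st)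
        (PySem.List.pySetD t ((PySem.List.pyGet? G x).getD [])[i] (some c)) (c + 1) := by
  conv_lhs => rw [DFS_machine.eq_def]
  simp only [dif_pos hi, hn, if_true]

theorem visitLoop_fuel (G : List (List Int)) (fuel : Nat) (s : Int) (ns : List Int)
    (t : List (Option Int)) (T : Int) (h : ncount t ≤ fuel) :
    DFS_visitLoop G (fuel + 1) s ns t T = DFS_visitLoop G fuel s ns t T := by
  revert h
  fun_induction DFS_visitLoop G fuel s ns t T with
  | case1 _ _ time T => intro h; rw [vL_nil]
  | case2 fuel s n ns time T hn ih =>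
    intro h
    rw [vL_cons_none G (fuel + 1) s n ns time T hn]
    exact ih h
  | case3 s n ns time T tv hn hc time1 ih =>
    intro h
    have := ncount_pos_of_get (hc.1 ▸ hn)
    omega
  | case4 s n ns time T tv hn hc time1 fuel' r ih1 ih1' ih2 =>
    intro h
    have hset : ncount time = ncount (PySem.List.pySetD time n (some T)) + 1 :=
      ncount_pySetD_of_none (hc.1 ▸ hn)
    have hmr : ncount r.1 ≤ ncount (PySem.List.pySetD time n (some T)) :=
      ncount_le_of_mono (mono_visitLoop G fuel' s ((PySem.List.pyGet? G n).getD [])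
        (PySem.List.pySetD time n (some T)) (T + 1))
    rw [vL_cons_disc G (fuel' + 1) s n ns time T tv hn hc]
    rw [ih1' (by omega)]
    exact ih2 (by omega)
  | case5 fuel s n ns time T tv hn hc ih =>
    intro h
    rw [vL_cons_skip G (fuel + 1) s n ns time T tv hn hc]
    exact ih h

theorem machine_fuel (G : List (List Int)) (fuel : Nat) (st : List (Int × Nat))
    (t : List (Option Int)) (c : Int) (h : ncount t ≤ fuel) :
    DFS_machine G (fuel + 1) st t c = DFS_machine G fuel st t c := by
  revert h
  fun_induction DFS_machine G fuel st t c with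
  | case1 _ time c => intro h; rw [m_nil]
  | case2 fuel x i st time c hi n hn ih =>
    intro h
    rw [m_skip_none G (fuel + 1) x i st time c hi hn]
    exact ih h
  | case3 x i st time c hi n hn ih =>
    intro h
    have := ncount_pos_of_get hn
    omega
  | case4 x i st time c hi n fuel' hn ih =>
    intro h
    have hset : ncount time = ncount (PySem.List.pySetD time n (some c)) + 1 :=
      ncount_pySetD_of_none hn
    rw [m_disc G (fuel' + 1) x i st time c hi hn]
    exact ih (by omega)
  | case5 fuel x i st time c hi n tv hn htv ih =>
    intro h
    rw [m_skip_vis G (fuel + 1) x i st time c tv hi hn htv]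
    exact ih h
  | case6 fuel x i st time c hi ih =>
    intro h
    rw [m_pop G (fuel + 1) x i st time c hi]
    exact ih h

theorem someAt_ne {t : List (Option Int)} {s n : Int}
    (hs : SomeAt t s) (hn : PySem.List.pyGet? t n = some none) : ¬(n = s) := by
  intro he
  obtain ⟨v, hv⟩ := hs
  rw [he, hv] at hn
  simp at hn

theorem sim (G : List (List Int)) :
    ∀ (fuel : Nat) (x : Int) (i : Nat) (st : List (Int × Nat)) (t : List (Option Int)) (c s : Int),
      ncount t ≤ fuel → SomeAt t s →
      DFS_machine G fuel ((x, i) :: st) t c =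
        DFS_machine G fuel st
          (DFS_visitLoop G fuel s (((PySem.List.pyGet? G x).getD []).drop i) t c).1
          (DFS_visitLoop G fuel s (((PySem.List.pyGet? G x).getD []).drop i) t c).2 := by
  intro fuel
  induction fuel using Nat.strong_induction_on with
  | _ fuel IH =>
  suffices inner : ∀ (k : Nat) (x : Int) (i : Nat) (st : List (Int × Nat)) (t : List (Option Int)) (c s : Int),
      ((PySem.List.pyGet? G x).getD []).length - i ≤ k → ncount t ≤ fuel → SomeAt t s →
      DFS_machine G fuel ((x, i) :: st) t c =
        DFS_machine G fuel st
          (DFS_visitLoop G fuel s (((PySem.List.pyGet? G x).getD []).drop i) t c).1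
          (DFS_visitLoop G fuel s (((PySem.List.pyGet? G x).getD []).drop i) t c).2 by
    intro x i st t c s h hs
    exact inner (((PySem.List.pyGet? G x).getD []).length - i) x i st t c s le_rfl h hs
  intro k
  induction k with
  | zero =>
    intro x i st t c s hk h hs
    have hi : ¬ i < ((PySem.List.pyGet? G x).getD []).length := by omega
    rw [m_pop G fuel x i st t c hi, List.drop_eq_nil_of_le (by omega), vL_nil]
  | succ k IHk =>
    intro x i st t c s hk h hs
    by_cases hi : i < ((PySem.List.pyGet? G x).getD []).length
    · have hdrop : ((PySem.List.pyGet? G x).getD []).drop i =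
          ((PySem.List.pyGet? G x).getD [])[i] :: ((PySem.List.pyGet? G x).getD []).drop (i + 1) :=
        List.drop_eq_getElem_cons hi
      cases hn : PySem.List.pyGet? t ((PySem.List.pyGet? G x).getD [])[i] with
      | none =>
        rw [m_skip_none G fuel x i st t c hi hn, hdrop,
          vL_cons_none G fuel s _ _ t c hn]
        exact IHk x (i + 1) st t c s (by omega) h hs
      | some tv =>
        by_cases htv : tv = none
        · subst htv
          -- discovery step
          have hne : ¬(((PySem.List.pyGet? G x).getD [])[i] = s) := someAt_ne hs hn
          have hpos : 0 < ncount t := ncount_pos_of_get hn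
          obtain ⟨f', rfl⟩ : ∃ f', fuel = f' + 1 := ⟨fuel - 1, by omega⟩
          have hset : ncount t = ncount (PySem.List.pySetD t ((PySem.List.pyGet? G x).getD [])[i] (some c)) + 1 :=
            ncount_pySetD_of_none hn
          have hs1 : SomeAt (PySem.List.pySetD t ((PySem.List.pyGet? G x).getD [])[i] (some c)) s :=
            someAt_mono (mono_pySetD_of_none hn) hs
          have hq := mono_visitLoop G f' s ((PySem.List.pyGet? G ((PySem.List.pyGet? G x).getD [])[i]).getD [])
            (PySem.List.pySetD t ((PySem.List.pyGet? G x).getD [])[i] (some c)) (c + 1)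
          have hqn : ncount (DFS_visitLoop G f' s ((PySem.List.pyGet? G ((PySem.List.pyGet? G x).getD [])[i]).getD [])
              (PySem.List.pySetD t ((PySem.List.pyGet? G x).getD [])[i] (some c)) (c + 1)).1 ≤ f' := by
            have := ncount_le_of_mono hq
            omega
          have hw := mono_visitLoop G f' s (((PySem.List.pyGet? G x).getD []).drop (i + 1))
            (DFS_visitLoop G f' s ((PySem.List.pyGet? G ((PySem.List.pyGet? G x).getD [])[i]).getD [])
              (PySem.List.pySetD t ((PySem.List.pyGet? G x).getD [])[i] (some c)) (c + 1)).1
            (DFS_visitLoop G f' s ((PySem.List.pyGet? G ((PySem.List.pyGet? G x).getD [])[i]).getD [])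
              (PySem.List.pySetD t ((PySem.List.pyGet? G x).getD [])[i] (some c)) (c + 1)).2
          rw [m_disc G f' x i st t c hi hn]
          rw [IH f' (by omega) ((PySem.List.pyGet? G x).getD [])[i] 0 ((x, i + 1) :: st)
            (PySem.List.pySetD t ((PySem.List.pyGet? G x).getD [])[i] (some c)) (c + 1) s (by omega) hs1]
          rw [List.drop_zero]
          rw [IH f' (by omega) x (i + 1) st _ _ s hqn (someAt_mono hq hs1)]
          rw [hdrop, vL_cons_disc G f' s _ _ t c none hn ⟨rfl, hne⟩]
          rw [visitLoop_fuel G f' s (((PySem.List.pyGet? G x).getD []).drop (i + 1)) _ _ hqn]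
          rw [machine_fuel G f' st _ _ (by
            have := ncount_le_of_mono hw
            omega)]
        · rw [m_skip_vis G fuel x i st t c tv hi hn htv, hdrop,
            vL_cons_skip G fuel s _ _ t c tv hn (fun hcc => htv hcc.1)]
          exact IHk x (i + 1) st t c s (by omega) h hs
    · rw [m_pop G fuel x i st t c hi, List.drop_eq_nil_of_le (by omega), vL_nil]

theorem pyIdx?_natCast_lt (n u : Nat) (h : u < n) : PySem.List.pyIdx? (n : Nat) (u : Int) = some u := by
  unfold PySem.List.pyIdx?
  split_ifs with h1 h2 <;> simp_all <;> omega

theorem someAt_set (t : List (Option Int)) (c : Int) (u : Nat) (hu : u < t.length) :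
    SomeAt (t.set u (some c)) (u : Int) := by
  refine ⟨c, ?_⟩
  have hidx : PySem.List.pyIdx? (t.set u (some c)).length (u : Int) = some u := by
    rw [List.length_set]
    exact pyIdx?_natCast_lt _ _ hu
  rw [pyGet?_eq_of_idx hidx]
  exact List.getElem?_set_self hu

theorem step_eq (G : List (List Int)) (t : List (Option Int)) (c : Int) (u : Nat)
    (hlen : t.length = G.length) (hu : u < G.length) :
    (if t.getD u none = none then
        DFS_visitLoop G G.length (u : Int) ((PySem.List.pyGet? G (u : Int)).getD [])
          (t.set u (some c)) (c + 1)
      else (t, c)) =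
    (if t.getD u none ≠ none then (t, c)
      else DFS_machine G G.length [((u : Int), 0)] (t.set u (some c)) (c + 1)) := by
  by_cases h : t.getD u none = none
  · rw [if_pos h, if_neg (by simpa [List.getD] using h)]
    have hsim := sim G G.length (u : Int) 0 [] (t.set u (some c)) (c + 1) (u : Int)
      (le_trans (ncount_le_length _) (by simp [hlen])) (someAt_set t c u (hlen ▸ hu))
    rw [hsim, m_nil, List.drop_zero]
  · rw [if_neg h, if_pos (by simpa [List.getD] using h)]

theorem fold_eq (G : List (List Int)) :
    ∀ (us : List Nat) (t : List (Option Int)) (c : Int),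
      t.length = G.length → (∀ u ∈ us, u < G.length) →
      us.foldl (fun (st : List (Option Int) × Int) u =>
          if st.1.getD u none = none then
            DFS_visitLoop G G.length (u : Int) ((PySem.List.pyGet? G (u : Int)).getD [])
              (st.1.set u (some st.2)) (st.2 + 1)
          else st) (t, c) =
      us.foldl (fun (st : List (Option Int) × Int) u =>
          if st.1.getD u none ≠ none then st
          else DFS_machine G G.length [((u : Int), 0)] (st.1.set u (some st.2)) (st.2 + 1)) (t, c) := by
  intro us
  induction us with
  | nil => intro t c _ _; rfl
  | cons u us ih =>
    intro t c hlen hus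
    simp only [List.foldl_cons]
    rw [show (if t.getD u none ≠ none then (t, c)
        else DFS_machine G G.length [((u : Int), 0)] (t.set u (some c)) (c + 1)) =
        (if t.getD u none = none then
          DFS_visitLoop G G.length (u : Int) ((PySem.List.pyGet? G (u : Int)).getD [])
            (t.set u (some c)) (c + 1)
        else (t, c)) from (step_eq G t c u hlen (hus u (by simp))).symm]
    by_cases h : t.getD u none = none
    · rw [if_pos h]
      have hlen2 : (DFS_visitLoop G G.length (u : Int) ((PySem.List.pyGet? G (u : Int)).getD [])
          (t.set u (some c)) (c + 1)).1.length = G.length := by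
        rw [← mono_length (mono_visitLoop G G.length (u : Int)
          ((PySem.List.pyGet? G (u : Int)).getD []) (t.set u (some c)) (c + 1))]
        rw [List.length_set]
        exact hlen
      exact ih _ _ hlen2 (fun v hv => hus v (by simp [hv]))
    · rw [if_neg h]
      exact ih _ _ hlen (fun v hv => hus v (by simp [hv]))

theorem top_eq (G : List (List Int)) : DFS_time G = DFS_time_alt G := by
  simp only [DFS_time, DFS_time_alt]
  rw [fold_eq G (List.range G.length) (List.replicate G.length none) 0 (by simp)
    (fun u hu => List.mem_range.mp hu)]

-- ===== VERDICT (by name: the statement is the Claim_ definition above) =====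
theorem DFS_time_spec : Claim_equal_DFS_time := by
  intro G _ _
  unfold Spec_DFS_time
  exact top_eq G
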